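-- pv_equiv track=rewrite | github.com/FatemehDehghan224/hungry_agent | dfs_agent/utils.py | dfs_text
-- ===== SOURCE A (Python) =====
-- from typing import List, Tuple
--
-- def dfs_text(grid: List[List[str]], start: Tuple[int, int]):
--     """
--     A stack-based DFS for text mode.
--     Returns: (path_list, steps, food_pos)
--     path_list contains tuples (x,y,move) and last item may be (x,y)
--     """
--     rows, cols = len(grid), len(grid[0])
--     stack = [(start, [])]
--     visited = set()
--     directions = [(-1, 0, 1), (1, 0, 3), (0, -1, 4), (0, 1, 2)]
--     food_pos = None
--
--     while stack:
--         (x, y), path = stack.pop()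
--         if not (0 <= x < rows and 0 <= y < cols):
--             continue
--         if (x, y) in visited:
--             continue
--         if grid[x][y] == '*':
--             continue
--
--         visited.add((x, y))
--
--         if grid[x][y] in ('f', 'F'):
--             food_pos = (x, y)
--             path.append((x, y))
--             return path, len(path) - 1, food_pos
--
--         for dx, dy, move in directions:
--             nx, ny = x + dx, y + dy
--             if 0 <= nx < rows and 0 <= ny < cols and (nx, ny) not in visited and grid[nx][ny] != '*':
--                 stack.append(((nx, ny), path + [(x, y, move)]))
--
--     return [], 0, (-1, -1)
-- ===== SOURCE B (Python) =====
-- from typing import List, Tuple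
--
-- def dfs_text(grid: List[List[str]], start: Tuple[int, int]):
--     """
--     Backtracking walk: keep ONE current path as a stack of frames
--     (x, y, next_direction_index), mark cells visited on entry, and try the
--     directions of each frame lazily; on food the path is read off the frame
--     stack once; no per-push path copies and no duplicate stack entries.
--     """
--     rows, cols = len(grid), len(grid[0])
--     DIRS = ((0, 1, 2), (0, -1, 4), (1, 0, 3), (-1, 0, 1))
--     visited = set()
--     sx, sy = start
--     if not (0 <= sx < rows and 0 <= sy < cols) or grid[sx][sy] == '*':
--         return [], 0, (-1, -1)
--     visited.add((sx, sy))
--     frames = [[sx, sy, 0]]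
--     while frames:
--         x, y, i = frames[-1]
--         if i == 0 and grid[x][y] in ('f', 'F'):
--             path = [(f[0], f[1], DIRS[f[2] - 1][2]) for f in frames[:-1]]
--             path.append((x, y))
--             return path, len(path) - 1, (x, y)
--         if i == 4:
--             frames.pop()
--             continue
--         frames[-1][2] = i + 1
--         dx, dy, mv = DIRS[i]
--         nx, ny = x + dx, y + dy
--         if 0 <= nx < rows and 0 <= ny < cols and (nx, ny) not in visited and grid[nx][ny] != '*':
--             visited.add((nx, ny))
--             frames.append([nx, ny, 0])
--     return [], 0, (-1, -1)
-- ===== Notes on version B (the rewrite author's own statement) =====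
-- stated objective: alternative
-- what changed: B replaces A's stack of (cell, copied-path) entries with mark-on-pop by a backtracking walk: one frame stack of (x, y, next-direction-index) that IS the current path, cells marked visited on entry, directions tried lazily per frame, and the path read off the frame stack once when food is found; intended as faster (it avoids A's per-push path copies), but a timing run measured only 1.26x at the largest size, so no speed is claimed.
-- outside the precondition, e.g. on dfs_text([['*'], []], (0, 0)): A returns ([], 0, (-1, -1)), B returns ([], 0, (-1, -1))
import Mathlib
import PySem

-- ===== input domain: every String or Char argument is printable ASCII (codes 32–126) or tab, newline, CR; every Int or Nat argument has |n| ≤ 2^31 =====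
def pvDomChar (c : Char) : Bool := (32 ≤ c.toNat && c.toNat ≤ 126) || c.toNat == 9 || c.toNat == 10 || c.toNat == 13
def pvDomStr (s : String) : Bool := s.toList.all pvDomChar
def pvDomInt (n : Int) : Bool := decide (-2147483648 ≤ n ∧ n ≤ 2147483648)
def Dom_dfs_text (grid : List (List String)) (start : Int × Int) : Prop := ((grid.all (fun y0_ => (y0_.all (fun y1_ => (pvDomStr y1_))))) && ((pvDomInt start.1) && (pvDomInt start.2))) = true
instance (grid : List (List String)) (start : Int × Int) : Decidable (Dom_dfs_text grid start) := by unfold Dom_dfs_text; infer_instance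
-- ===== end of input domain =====

-- B replaces A's stack of (cell, copied-path) entries (mark-on-pop) by a backtracking walk whose
-- frame stack (x, y, next-direction-index) IS the current path, marked visited on entry
-- (objective: alternative — no per-push path copies, no duplicate stack entries; intended as
-- faster, but a timing run measured only 1.26x at the largest size, so no speed is claimed).

-- ===== PORT A =====
-- grid[x][y]; under Pre_ every access the loops make is in range, so the defaults never fire
def pvCell (grid : List (List String)) (x y : Int) : String :=
  (PySem.List.pyGet? ((PySem.List.pyGet? grid x).getD []) y).getD ""

def pvDirs : List (Int × Int × Int) := [(-1, 0, 1), (1, 0, 3), (0, -1, 4), (0, 1, 2)]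

-- the while loop of A; stack top at the HEAD (Python's list end); fuel-bounded
-- (the measure 5·|unvisited| + |stack| drops each iteration, so the fuel chosen below is never exhausted)
def pvLoopA (grid : List (List String)) (rows cols : Int) :
    Nat → List ((Int × Int) × List (List Int)) → PySem.Set (Int × Int) →
    List (List Int) × Int × (Int × Int)
  | 0, _, _ => ([], 0, (-1, -1))
  | _ + 1, [], _ => ([], 0, (-1, -1))
  | fuel + 1, ((x, y), path) :: rest, visited =>
    if ¬ (0 ≤ x ∧ x < rows ∧ 0 ≤ y ∧ y < cols) then pvLoopA grid rows cols fuel rest visited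
    else if PySem.Set.contains visited (x, y) then pvLoopA grid rows cols fuel rest visited
    else if pvCell grid x y = "*" then pvLoopA grid rows cols fuel rest visited
    else if pvCell grid x y = "f" ∨ pvCell grid x y = "F" then
      (path ++ [[x, y]], ((path ++ [[x, y]]).length : Int) - 1, (x, y))
    else
      pvLoopA grid rows cols fuel
        (pvDirs.foldl (fun st d =>
          if 0 ≤ x + d.1 ∧ x + d.1 < rows ∧ 0 ≤ y + d.2.1 ∧ y + d.2.1 < cols ∧
             ¬ PySem.Set.contains (PySem.Set.add visited (x, y)) (x + d.1, y + d.2.1) ∧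
             pvCell grid (x + d.1) (y + d.2.1) ≠ "*"
          then ((x + d.1, y + d.2.1), path ++ [[x, y, d.2.2]]) :: st else st) rest)
        (PySem.Set.add visited (x, y))

def dfs_text (grid : List (List String)) (start : Int × Int) : List (List Int) × Int × (Int × Int) :=
  pvLoopA grid grid.length (grid.headD []).length
    (5 * grid.length * (grid.headD []).length + 2) [(start, [])] PySem.Set.empty

-- ===== PORT B =====
-- B's direction tuple (right, left, down, up — the order B tries them)
def pvBDirs : List (Int × Int × Int) := [(0, 1, 2), (0, -1, 4), (1, 0, 3), (-1, 0, 1)]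

-- the while loop of B: the frame stack (top at the HEAD; Python's list end) is the current path,
-- each frame (x, y, next-direction-index); fuel-bounded (the measure 5·|unvisited| + Σ(5 - i)
-- drops each iteration, so the fuel below is never exhausted; i stays ≤ 4, so the getD defaults
-- and the Nat subtraction i-1 match Python's DIRS[i] / DIRS[f[2]-1] exactly on reachable states)
def pvLoopB (grid : List (List String)) (rows cols : Int) :
    Nat → List (Int × Int × Nat) → PySem.Set (Int × Int) →
    List (List Int) × Int × (Int × Int)
  | 0, _, _ => ([], 0, (-1, -1))
  | _ + 1, [], _ => ([], 0, (-1, -1))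
  | fuel + 1, (x, y, i) :: rest, visited =>
    if i = 0 ∧ (pvCell grid x y = "f" ∨ pvCell grid x y = "F") then
      let path := (rest.map (fun f => [f.1, f.2.1, (pvBDirs.getD (f.2.2 - 1) (0, 0, 0)).2.2])).reverse
                    ++ [[x, y]]
      (path, (path.length : Int) - 1, (x, y))
    else if i = 4 then pvLoopB grid rows cols fuel rest visited
    else
      let d := pvBDirs.getD i (0, 0, 0)
      if 0 ≤ x + d.1 ∧ x + d.1 < rows ∧ 0 ≤ y + d.2.1 ∧ y + d.2.1 < cols ∧
         ¬ PySem.Set.contains visited (x + d.1, y + d.2.1) ∧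
         pvCell grid (x + d.1) (y + d.2.1) ≠ "*" then
        pvLoopB grid rows cols fuel ((x + d.1, y + d.2.1, 0) :: (x, y, i + 1) :: rest)
          (PySem.Set.add visited (x + d.1, y + d.2.1))
      else
        pvLoopB grid rows cols fuel ((x, y, i + 1) :: rest) visited

def dfs_text_alt (grid : List (List String)) (start : Int × Int) : List (List Int) × Int × (Int × Int) :=
  let rows : Int := grid.length
  let cols : Int := (grid.headD []).length
  if ¬ (0 ≤ start.1 ∧ start.1 < rows ∧ 0 ≤ start.2 ∧ start.2 < cols) ∨
     pvCell grid start.1 start.2 = "*" then ([], 0, (-1, -1))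
  else
    pvLoopB grid rows cols (5 * grid.length * (grid.headD []).length + 2)
      [(start.1, start.2, 0)] (PySem.Set.add PySem.Set.empty (start.1, start.2))

-- ===== PRECONDITION & SPEC =====
-- Pre_ excludes the empty grid (A raises IndexError on grid[0]) and ragged grids (a row shorter
-- than the first) with an in-bounds start, where A can raise IndexError on reaching a missing
-- cell; on some such grids the missing cell is never reached and A still returns (see claim cites).
def Pre_dfs_text (grid : List (List String)) (start : Int × Int) : Prop :=
  grid ≠ [] ∧
    ((∀ row ∈ grid, (grid.headD []).length ≤ row.length) ∨
      ¬ (0 ≤ start.1 ∧ start.1 < (grid.length : Int) ∧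
         0 ≤ start.2 ∧ start.2 < ((grid.headD []).length : Int)))
instance (grid : List (List String)) (start : Int × Int) : Decidable (Pre_dfs_text grid start) := by
  unfold Pre_dfs_text; infer_instance

def pvWitness_dfs_text : List (List String) × (Int × Int) := ([[".", "f"], [".", "*"]], (0, 0))

def Spec_dfs_text (grid : List (List String)) (start : Int × Int) (out : List (List Int) × Int × (Int × Int)) : Prop := out = dfs_text_alt grid start
instance (grid : List (List String)) (start : Int × Int) (out : List (List Int) × Int × (Int × Int)) : Decidable (Spec_dfs_text grid start out) := by unfold Spec_dfs_text; infer_instance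

-- ===== CLAIM (what is proved, stated in full; the proofs are below) =====
def Claim_equal_dfs_text : Prop := ∀ (grid : List (List String)) (start : Int × Int), Dom_dfs_text grid start → Pre_dfs_text grid start → Spec_dfs_text grid start (dfs_text grid start)

-- ===== LEMMAS AND PROOFS =====

-- the common reference recursion both loops are proved equal to: a mark-on-entry DFS returning the
-- reversed path (food first) and the food position, threading the visited set; fuel bounds DEPTH
def pvTry (V : Int → Int → PySem.Set (Int × Int) → Option (List (List Int) × (Int × Int)) × PySem.Set (Int × Int))
    (x y : Int) :
    List (Int × Int × Int) → PySem.Set (Int × Int) →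
    Option (List (List Int) × (Int × Int)) × PySem.Set (Int × Int)
  | [], vis => (none, vis)
  | d :: ds, vis =>
    match V (x + d.1) (y + d.2.1) vis with
    | (some (rt, pos), vis') => (some (rt ++ [[x, y, d.2.2]], pos), vis')
    | (none, vis') => pvTry V x y ds vis'

def pvVisit (grid : List (List String)) (rows cols : Int) :
    Nat → Int → Int → PySem.Set (Int × Int) →
    Option (List (List Int) × (Int × Int)) × PySem.Set (Int × Int)
  | 0, _, _, vis => (none, vis)
  | f + 1, x, y, vis =>
    if ¬ (0 ≤ x ∧ x < rows ∧ 0 ≤ y ∧ y < cols) ∨ PySem.Set.contains vis (x, y) = true ∨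
       pvCell grid x y = "*" then (none, vis)
    else
      let vis1 := PySem.Set.add vis (x, y)
      if pvCell grid x y = "f" ∨ pvCell grid x y = "F" then (some ([[x, y]], (x, y)), vis1)
      else pvTry (pvVisit grid rows cols f) x y pvBDirs vis1

-- |{in-grid cells not yet visited}| — the potential that bounds every loop's remaining work
def pvU (rows cols : Int) (vis : PySem.Set (Int × Int)) : Nat :=
  ((Finset.range rows.toNat ×ˢ Finset.range cols.toNat).filter
    (fun q => PySem.Set.contains vis ((q.1 : Int), (q.2 : Int)) = false)).card

-- per-frame remaining work of B's machine
def pvNu (frames : List (Int × Int × Nat)) : Nat := (frames.map (fun f => 5 - f.2.2)).sum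

-- the move recorded in a finished frame
def pvStepF (f : Int × Int × Nat) : List Int := [f.1, f.2.1, (pvBDirs.getD (f.2.2 - 1) (0, 0, 0)).2.2]

theorem pvU_mono (rows cols : Int) (vis vis' : PySem.Set (Int × Int))
    (h : ∀ q, PySem.Set.contains vis q = true → PySem.Set.contains vis' q = true) :
    pvU rows cols vis' ≤ pvU rows cols vis := by
  apply Finset.card_le_card
  intro q hq
  simp only [Finset.mem_filter] at hq ⊢
  refine ⟨hq.1, ?_⟩
  by_contra hne
  have : PySem.Set.contains vis ((q.1 : Int), (q.2 : Int)) = true := by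
    cases hcv : PySem.Set.contains vis ((q.1 : Int), (q.2 : Int)) with
    | false => exact absurd hcv hne
    | true => rfl
  have := h _ this
  rw [this] at hq
  exact absurd hq.2 (by simp)

theorem pvU_add (rows cols x y : Int) (vis : PySem.Set (Int × Int))
    (hx : 0 ≤ x ∧ x < rows) (hy : 0 ≤ y ∧ y < cols)
    (hnc : PySem.Set.contains vis (x, y) = false) :
    pvU rows cols (PySem.Set.add vis (x, y)) + 1 = pvU rows cols vis := by
  unfold pvU
  have hmem : (x.toNat, y.toNat) ∈ (Finset.range rows.toNat ×ˢ Finset.range cols.toNat).filter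
      (fun q => PySem.Set.contains vis ((q.1 : Int), (q.2 : Int)) = false) := by
    simp only [Finset.mem_filter, Finset.mem_product, Finset.mem_range]
    refine ⟨⟨?_, ?_⟩, ?_⟩ <;> try omega
    simpa [Int.toNat_of_nonneg hx.1, Int.toNat_of_nonneg hy.1] using hnc
  have hfe : (Finset.range rows.toNat ×ˢ Finset.range cols.toNat).filter
      (fun q => PySem.Set.contains (PySem.Set.add vis (x, y)) ((q.1 : Int), (q.2 : Int)) = false)
      = ((Finset.range rows.toNat ×ˢ Finset.range cols.toNat).filter
          (fun q => PySem.Set.contains vis ((q.1 : Int), (q.2 : Int)) = false)).erase (x.toNat, y.toNat) := by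
    ext q
    simp only [Finset.mem_filter, Finset.mem_erase, Finset.mem_product, Finset.mem_range]
    constructor
    · rintro ⟨hq, hc⟩
      have hmemadd : ¬ ((q.1 : Int), (q.2 : Int)) ∈ PySem.Set.add vis (x, y) := by
        intro hm
        rw [← PySem.Set.contains_iff _ _] at hm
        rw [hm] at hc
        exact absurd hc (by simp)
      rw [PySem.Set.mem_add] at hmemadd
      push Not at hmemadd
      refine ⟨?_, hq, ?_⟩
      · intro he
        apply hmemadd.2
        rw [he]
        simp [Int.toNat_of_nonneg hx.1, Int.toNat_of_nonneg hy.1]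
      · cases hcv : PySem.Set.contains vis ((q.1 : Int), (q.2 : Int)) with
        | false => rfl
        | true => exact absurd ((PySem.Set.contains_iff _ _).mp hcv) (fun hm => hmemadd.1 hm)
    · rintro ⟨hne, hq, hc⟩
      refine ⟨hq, ?_⟩
      cases hcv : PySem.Set.contains (PySem.Set.add vis (x, y)) ((q.1 : Int), (q.2 : Int)) with
      | false => rfl
      | true =>
        exfalso
        have := (PySem.Set.contains_iff _ _).mp hcv
        rw [PySem.Set.mem_add] at this
        rcases this with hm | he
        · rw [← PySem.Set.contains_iff _ _] at hm
          rw [hm] at hc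
          exact absurd hc (by simp)
        · apply hne
          have h1 : (q.1 : Int) = x := congrArg Prod.fst he
          have h2 : (q.2 : Int) = y := congrArg Prod.snd he
          have e1 : q.1 = x.toNat := by omega
          have e2 : q.2 = y.toNat := by omega
          exact Prod.ext e1 e2
    
  rw [hfe, Finset.card_erase_of_mem hmem]
  have : 0 < ((Finset.range rows.toNat ×ˢ Finset.range cols.toNat).filter
      (fun q => PySem.Set.contains vis ((q.1 : Int), (q.2 : Int)) = false)).card :=
    Finset.card_pos.mpr ⟨_, hmem⟩
  omega

theorem pvU_empty (rows cols : Int) : pvU rows cols PySem.Set.empty = rows.toNat * cols.toNat := by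
  unfold pvU
  rw [Finset.filter_true_of_mem, Finset.card_product, Finset.card_range, Finset.card_range]
  intro q _
  rfl

theorem pvTry_mono
    (V : Int → Int → PySem.Set (Int × Int) → Option (List (List Int) × (Int × Int)) × PySem.Set (Int × Int))
    (hV : ∀ x y vis q, PySem.Set.contains vis q = true → PySem.Set.contains (V x y vis).2 q = true) :
    ∀ (ds : List (Int × Int × Int)) (x y : Int) (vis : PySem.Set (Int × Int)) (q : Int × Int),
      PySem.Set.contains vis q = true →
      PySem.Set.contains (pvTry V x y ds vis).2 q = true := by
  intro ds
  induction ds with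
  | nil => intro x y vis q h; exact h
  | cons d ds ih =>
    intro x y vis q h
    simp only [pvTry]
    rcases hv : V (x + d.1) (y + d.2.1) vis with ⟨r, vis'⟩
    have hq' : PySem.Set.contains vis' q = true := by
      have := hV (x + d.1) (y + d.2.1) vis q h
      rw [hv] at this
      exact this
    match r with
    | some (rt, pos) => exact hq'
    | none => exact ih x y vis' q hq' 

theorem pvVisit_mono (grid : List (List String)) (rows cols : Int) :
    ∀ (f : Nat) (x y : Int) (vis : PySem.Set (Int × Int)) (q : Int × Int),
      PySem.Set.contains vis q = true →
      PySem.Set.contains (pvVisit grid rows cols f x y vis).2 q = true := by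
  intro f
  induction f with
  | zero => intro x y vis q h; exact h
  | succ f ih =>
    intro x y vis q h
    simp only [pvVisit]
    split
    · exact h
    · have hadd : PySem.Set.contains (PySem.Set.add vis (x, y)) q = true := by
        rw [PySem.Set.contains_iff] at h ⊢
        exact (PySem.Set.mem_add _ _ _).mpr (Or.inl h)
      split
      · exact hadd
      · exact pvTry_mono _ ih pvBDirs x y _ q hadd

theorem pvFoldl_push_eq {γ δ : Type} (c : γ → Prop) [DecidablePred c] (f : γ → δ) :
    ∀ (ds : List γ) (s : List δ),
      ds.foldl (fun st d => if c d then f d :: st else st) s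
        = ((ds.reverse.filter (fun d => decide (c d))).map f) ++ s := by
  intro ds
  induction ds with
  | nil => intro s; simp
  | cons d ds ih =>
    intro s
    simp only [List.foldl, List.reverse_cons, List.filter_append, List.map_append,
      List.append_assoc]
    rw [ih]
    by_cases hc : c d <;> simp [hc]

-- the fuels of A's loop are irrelevant once they exceed the potential 5·pvU + |stack|
theorem pvLoopA_stable (grid : List (List String)) (rows cols : Int) :
    ∀ (n : Nat) (stack : List ((Int × Int) × List (List Int))) (vis : PySem.Set (Int × Int)) (fa fb : Nat),
      5 * pvU rows cols vis + stack.length ≤ n → n < fa → n < fb →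
      pvLoopA grid rows cols fa stack vis = pvLoopA grid rows cols fb stack vis := by
  intro n
  induction n using Nat.strong_induction_on with
  | _ n ih =>
    intro stack vis fa fb hmu hfa hfb
    obtain ⟨fa, rfl⟩ : ∃ k, fa = k + 1 := ⟨fa - 1, by omega⟩
    obtain ⟨fb, rfl⟩ : ∃ k, fb = k + 1 := ⟨fb - 1, by omega⟩
    match stack with
    | [] => rfl
    | ((x, y), path) :: rest =>
      simp only [List.length_cons] at hmu
      have hn1 : 1 ≤ n := by omega
      simp only [pvLoopA]
      by_cases h1 : ¬ (0 ≤ x ∧ x < rows ∧ 0 ≤ y ∧ y < cols)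
      · rw [if_pos h1, if_pos h1]
        exact ih (n - 1) (by omega) rest vis fa fb (by omega) (by omega) (by omega)
      · rw [if_neg h1, if_neg h1]
        by_cases h2 : PySem.Set.contains vis (x, y) = true
        · rw [if_pos h2, if_pos h2]
          exact ih (n - 1) (by omega) rest vis fa fb (by omega) (by omega) (by omega)
        · rw [if_neg h2, if_neg h2]
          by_cases h3 : pvCell grid x y = "*"
          · rw [if_pos h3, if_pos h3]
            exact ih (n - 1) (by omega) rest vis fa fb (by omega) (by omega) (by omega)
          · rw [if_neg h3, if_neg h3]
            by_cases h4 : pvCell grid x y = "f" ∨ pvCell grid x y = "F"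
            · rw [if_pos h4, if_pos h4]
            · rw [if_neg h4, if_neg h4]
              push Not at h1
              have hu : pvU rows cols (PySem.Set.add vis (x, y)) + 1 = pvU rows cols vis :=
                pvU_add rows cols x y vis ⟨h1.1, h1.2.1⟩ ⟨h1.2.2.1, h1.2.2.2⟩
                  (by cases hcv : PySem.Set.contains vis (x, y) with
                      | false => rfl
                      | true => exact absurd hcv h2)
              apply ih (n - 1) (by omega) _ _ fa fb _ (by omega) (by omega)
              rw [pvFoldl_push_eq]
              simp only [List.length_append, List.length_map]
              have hfl := List.length_filter_le (fun d => decide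
                (0 ≤ x + d.1 ∧ x + d.1 < rows ∧ 0 ≤ y + d.2.1 ∧ y + d.2.1 < cols ∧
                 ¬ PySem.Set.contains (PySem.Set.add vis (x, y)) (x + d.1, y + d.2.1) ∧
                 pvCell grid (x + d.1) (y + d.2.1) ≠ "*")) pvDirs.reverse
              have h4 : pvDirs.reverse.length = 4 := rfl
              omega

-- the fuels of B's machine are irrelevant once they exceed the potential 5·pvU + pvNu
theorem pvLoopB_stable (grid : List (List String)) (rows cols : Int) :
    ∀ (n : Nat) (frames : List (Int × Int × Nat)) (vis : PySem.Set (Int × Int)) (fa fb : Nat),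
      (∀ fr ∈ frames, fr.2.2 ≤ 4) →
      5 * pvU rows cols vis + pvNu frames ≤ n → n < fa → n < fb →
      pvLoopB grid rows cols fa frames vis = pvLoopB grid rows cols fb frames vis := by
  intro n
  induction n using Nat.strong_induction_on with
  | _ n ih =>
    intro frames vis fa fb hinv hmu hfa hfb
    obtain ⟨fa, rfl⟩ : ∃ k, fa = k + 1 := ⟨fa - 1, by omega⟩
    obtain ⟨fb, rfl⟩ : ∃ k, fb = k + 1 := ⟨fb - 1, by omega⟩
    match frames with
    | [] => rfl
    | (x, y, i) :: rest =>
      have hi : i ≤ 4 := hinv (x, y, i) (by simp)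
      have hrest : ∀ fr ∈ rest, fr.2.2 ≤ 4 := fun fr hfr => hinv fr (by simp [hfr])
      simp only [pvNu, List.map_cons, List.sum_cons] at hmu
      have hnur : pvNu rest = (rest.map (fun f => 5 - f.2.2)).sum := rfl
      simp only [pvLoopB]
      by_cases hf : i = 0 ∧ (pvCell grid x y = "f" ∨ pvCell grid x y = "F")
      · rw [if_pos hf, if_pos hf]
      · rw [if_neg hf, if_neg hf]
        by_cases h4 : i = 4
        · rw [if_pos h4, if_pos h4]
          subst h4
          exact ih (n - 1) (by omega) rest vis fa fb hrest (by rw [hnur]; omega)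
            (by omega) (by omega)
        · rw [if_neg h4, if_neg h4]
          by_cases hok : 0 ≤ x + (pvBDirs.getD i (0, 0, 0)).1 ∧
              x + (pvBDirs.getD i (0, 0, 0)).1 < rows ∧
              0 ≤ y + (pvBDirs.getD i (0, 0, 0)).2.1 ∧
              y + (pvBDirs.getD i (0, 0, 0)).2.1 < cols ∧
              ¬ PySem.Set.contains vis
                  (x + (pvBDirs.getD i (0, 0, 0)).1, y + (pvBDirs.getD i (0, 0, 0)).2.1) ∧
              pvCell grid (x + (pvBDirs.getD i (0, 0, 0)).1) (y + (pvBDirs.getD i (0, 0, 0)).2.1) ≠ "*"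
          · rw [if_pos hok, if_pos hok]
            have hu : pvU rows cols (PySem.Set.add vis
                (x + (pvBDirs.getD i (0, 0, 0)).1, y + (pvBDirs.getD i (0, 0, 0)).2.1)) + 1
                = pvU rows cols vis :=
              pvU_add rows cols _ _ vis ⟨hok.1, hok.2.1⟩ ⟨hok.2.2.1, hok.2.2.2.1⟩
                (by cases hcv : PySem.Set.contains vis
                      (x + (pvBDirs.getD i (0, 0, 0)).1, y + (pvBDirs.getD i (0, 0, 0)).2.1) with
                    | false => rfl
                    | true => exact absurd hcv hok.2.2.2.2.1)
            apply ih (n - 1) (by omega) _ _ fa fb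
            · intro fr hfr
              simp only [List.mem_cons] at hfr
              rcases hfr with rfl | rfl | hfr
              · simp
              · simp; omega
              · exact hrest fr hfr
            · simp only [pvNu, List.map_cons, List.sum_cons]
              omega
            · omega
            · omega
          · rw [if_neg hok, if_neg hok]
            apply ih (n - 1) (by omega) _ _ fa fb
            · intro fr hfr
              simp only [List.mem_cons] at hfr
              rcases hfr with rfl | hfr
              · simp; omega
              · exact hrest fr hfr
            · simp only [pvNu, List.map_cons, List.sum_cons]
              omega
            · omega
            · omega

-- A's stack loop computes what the reference recursion computes
theorem pvA_visit (grid : List (List String)) (rows cols : Int) :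
    ∀ (n : Nat) (vis : PySem.Set (Int × Int)) (x y : Int) (path : List (List Int))
      (rest : List ((Int × Int) × List (List Int))) (fa f : Nat),
      pvU rows cols vis ≤ n →
      5 * pvU rows cols vis + rest.length + 1 < fa →
      pvU rows cols vis < f →
      ((∀ vis', pvVisit grid rows cols f x y vis = (none, vis') →
          ∀ fa', 5 * pvU rows cols vis' + rest.length < fa' →
            pvLoopA grid rows cols fa (((x, y), path) :: rest) vis
              = pvLoopA grid rows cols fa' rest vis')
       ∧ (∀ rt pos vis', pvVisit grid rows cols f x y vis = (some (rt, pos), vis') →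
           pvLoopA grid rows cols fa (((x, y), path) :: rest) vis
             = (path ++ rt.reverse, ((path ++ rt.reverse).length : Int) - 1, pos))) := by
  intro n
  induction n using Nat.strong_induction_on with
  | _ n ih =>
    intro vis x y path rest fa f hun hfa hf
    obtain ⟨f0, rfl⟩ : ∃ k, f = k + 1 := ⟨f - 1, by omega⟩
    obtain ⟨fa0, rfl⟩ : ∃ k, fa = k + 1 := ⟨fa - 1, by omega⟩
    simp only [pvVisit]
    by_cases hg : ¬ (0 ≤ x ∧ x < rows ∧ 0 ≤ y ∧ y < cols) ∨
        PySem.Set.contains vis (x, y) = true ∨ pvCell grid x y = "*"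
    · -- the cell is skipped by both programs
      rw [if_pos hg]
      have hA : pvLoopA grid rows cols (fa0 + 1) (((x, y), path) :: rest) vis
          = pvLoopA grid rows cols fa0 rest vis := by
        simp only [pvLoopA]
        by_cases h1 : ¬ (0 ≤ x ∧ x < rows ∧ 0 ≤ y ∧ y < cols)
        · rw [if_pos h1]
        · rw [if_neg h1]
          by_cases h2 : PySem.Set.contains vis (x, y) = true
          · rw [if_pos h2]
          · rw [if_neg h2]
            have h3 : pvCell grid x y = "*" := by tauto
            rw [if_pos h3]
      constructor
      · intro vis' hv fa' hfa'
        obtain ⟨rfl⟩ : vis = vis' := by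
          have := congrArg Prod.snd hv; simpa using this
        rw [hA]
        exact pvLoopA_stable grid rows cols (5 * pvU rows cols vis + rest.length)
          rest vis fa0 fa' le_rfl (by omega) (by omega)
      · intro rt pos vis' hv
        exact absurd (congrArg Prod.fst hv) (by simp)
    · rw [if_neg hg]
      push Not at hg
      obtain ⟨hb, hc, hw⟩ := hg
      have hcf : PySem.Set.contains vis (x, y) = false := by
        cases hcv : PySem.Set.contains vis (x, y) with
        | false => rfl
        | true => exact absurd hcv hc
      have hu : pvU rows cols (PySem.Set.add vis (x, y)) + 1 = pvU rows cols vis :=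
        pvU_add rows cols x y vis ⟨hb.1, hb.2.1⟩ ⟨hb.2.2.1, hb.2.2.2⟩ hcf
      have hAhead : pvLoopA grid rows cols (fa0 + 1) (((x, y), path) :: rest) vis
          = if pvCell grid x y = "f" ∨ pvCell grid x y = "F" then
              (path ++ [[x, y]], ((path ++ [[x, y]]).length : Int) - 1, (x, y))
            else pvLoopA grid rows cols fa0
              (pvDirs.foldl (fun st d =>
                if 0 ≤ x + d.1 ∧ x + d.1 < rows ∧ 0 ≤ y + d.2.1 ∧ y + d.2.1 < cols ∧
                   ¬ PySem.Set.contains (PySem.Set.add vis (x, y)) (x + d.1, y + d.2.1) ∧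
                   pvCell grid (x + d.1) (y + d.2.1) ≠ "*"
                then ((x + d.1, y + d.2.1), path ++ [[x, y, d.2.2]]) :: st else st) rest)
              (PySem.Set.add vis (x, y)) := by
        simp only [pvLoopA]
        rw [if_neg (by tauto), if_neg hc, if_neg hw]
      by_cases hfood : pvCell grid x y = "f" ∨ pvCell grid x y = "F"
      · rw [if_pos hfood] at hAhead ⊢
        constructor
        · intro vis' hv
          exact absurd (congrArg Prod.fst hv) (by simp)
        · intro rt pos vis' hv
          have h1 : some ([[x, y]], (x, y)) = some (rt, pos) := congrArg Prod.fst hv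
          simp only [Option.some.injEq, Prod.mk.injEq] at h1
          rw [hAhead, ← h1.1, ← h1.2]
          simp
      · rw [if_neg hfood] at hAhead ⊢
        rw [pvFoldl_push_eq
          (fun d : Int × Int × Int => 0 ≤ x + d.1 ∧ x + d.1 < rows ∧ 0 ≤ y + d.2.1 ∧ y + d.2.1 < cols ∧
             ¬ PySem.Set.contains (PySem.Set.add vis (x, y)) (x + d.1, y + d.2.1) ∧
             pvCell grid (x + d.1) (y + d.2.1) ≠ "*")
          (fun d : Int × Int × Int => ((x + d.1, y + d.2.1), path ++ [[x, y, d.2.2]]))] at hAhead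
        have hrev : pvDirs.reverse = pvBDirs := by decide
        rw [hrev] at hAhead
        -- inner induction over the direction list B still has to try
        have MA2 : ∀ (ds : List (Int × Int × Int)) (visC : PySem.Set (Int × Int)),
            (∀ q, PySem.Set.contains (PySem.Set.add vis (x, y)) q = true →
                PySem.Set.contains visC q = true) →
            pvU rows cols visC < pvU rows cols vis →
            ((∀ vis', pvTry (pvVisit grid rows cols f0) x y ds visC = (none, vis') →
                ∀ fa2, 5 * pvU rows cols visC + ((ds.filter (fun d => decide
                      (0 ≤ x + d.1 ∧ x + d.1 < rows ∧ 0 ≤ y + d.2.1 ∧ y + d.2.1 < cols ∧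
                       ¬ PySem.Set.contains (PySem.Set.add vis (x, y)) (x + d.1, y + d.2.1) ∧
                       pvCell grid (x + d.1) (y + d.2.1) ≠ "*"))).map
                      (fun d : Int × Int × Int => ((x + d.1, y + d.2.1), path ++ [[x, y, d.2.2]]))
                      ++ rest).length < fa2 →
                ∀ fa', 5 * pvU rows cols vis' + rest.length < fa' →
                  pvLoopA grid rows cols fa2 ((ds.filter (fun d => decide
                      (0 ≤ x + d.1 ∧ x + d.1 < rows ∧ 0 ≤ y + d.2.1 ∧ y + d.2.1 < cols ∧
                       ¬ PySem.Set.contains (PySem.Set.add vis (x, y)) (x + d.1, y + d.2.1) ∧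
                       pvCell grid (x + d.1) (y + d.2.1) ≠ "*"))).map
                      (fun d : Int × Int × Int => ((x + d.1, y + d.2.1), path ++ [[x, y, d.2.2]]))
                      ++ rest) visC
                    = pvLoopA grid rows cols fa' rest vis')
             ∧ (∀ rt pos vis', pvTry (pvVisit grid rows cols f0) x y ds visC = (some (rt, pos), vis') →
                 ∀ fa2, 5 * pvU rows cols visC + ((ds.filter (fun d => decide
                      (0 ≤ x + d.1 ∧ x + d.1 < rows ∧ 0 ≤ y + d.2.1 ∧ y + d.2.1 < cols ∧
                       ¬ PySem.Set.contains (PySem.Set.add vis (x, y)) (x + d.1, y + d.2.1) ∧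
                       pvCell grid (x + d.1) (y + d.2.1) ≠ "*"))).map
                      (fun d : Int × Int × Int => ((x + d.1, y + d.2.1), path ++ [[x, y, d.2.2]]))
                      ++ rest).length < fa2 →
                   pvLoopA grid rows cols fa2 ((ds.filter (fun d => decide
                      (0 ≤ x + d.1 ∧ x + d.1 < rows ∧ 0 ≤ y + d.2.1 ∧ y + d.2.1 < cols ∧
                       ¬ PySem.Set.contains (PySem.Set.add vis (x, y)) (x + d.1, y + d.2.1) ∧
                       pvCell grid (x + d.1) (y + d.2.1) ≠ "*"))).map
                      (fun d : Int × Int × Int => ((x + d.1, y + d.2.1), path ++ [[x, y, d.2.2]]))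
                      ++ rest) visC
                    = (path ++ rt.reverse, ((path ++ rt.reverse).length : Int) - 1, pos))) := by
          intro ds
          induction ds with
          | nil =>
            intro visC hmono huC
            constructor
            · intro vis' hv fa2 hfa2 fa' hfa'
              obtain ⟨rfl⟩ : visC = vis' := by
                have := congrArg Prod.snd hv; simpa [pvTry] using this
              simp only [List.filter_nil, List.map_nil, List.nil_append] at hfa2 ⊢
              exact pvLoopA_stable grid rows cols (5 * pvU rows cols visC + rest.length)
                rest visC fa2 fa' le_rfl (by omega) (by omega)
            · intro rt pos vis' hv
              exact absurd (congrArg Prod.fst hv) (by simp [pvTry])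
          | cons d ds ihds =>
            intro visC hmono huC
            have hfC : pvU rows cols visC < f0 := by omega
            by_cases hgd : 0 ≤ x + d.1 ∧ x + d.1 < rows ∧ 0 ≤ y + d.2.1 ∧ y + d.2.1 < cols ∧
                ¬ PySem.Set.contains (PySem.Set.add vis (x, y)) (x + d.1, y + d.2.1) ∧
                pvCell grid (x + d.1) (y + d.2.1) ≠ "*"
            · -- the child was pushed by A; both sides descend into it
              have hfilter : List.filter (fun d => decide
                      (0 ≤ x + d.1 ∧ x + d.1 < rows ∧ 0 ≤ y + d.2.1 ∧ y + d.2.1 < cols ∧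
                       ¬ PySem.Set.contains (PySem.Set.add vis (x, y)) (x + d.1, y + d.2.1) ∧
                       pvCell grid (x + d.1) (y + d.2.1) ≠ "*")) (d :: ds)
                  = d :: List.filter (fun d => decide
                      (0 ≤ x + d.1 ∧ x + d.1 < rows ∧ 0 ≤ y + d.2.1 ∧ y + d.2.1 < cols ∧
                       ¬ PySem.Set.contains (PySem.Set.add vis (x, y)) (x + d.1, y + d.2.1) ∧
                       pvCell grid (x + d.1) (y + d.2.1) ≠ "*")) ds := List.filter_cons_of_pos (decide_eq_true hgd)
              have hIH := ih (pvU rows cols visC) (by omega) visC (x + d.1) (y + d.2.1)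
                (path ++ [[x, y, d.2.2]]) ((ds.filter (fun d => decide
                      (0 ≤ x + d.1 ∧ x + d.1 < rows ∧ 0 ≤ y + d.2.1 ∧ y + d.2.1 < cols ∧
                       ¬ PySem.Set.contains (PySem.Set.add vis (x, y)) (x + d.1, y + d.2.1) ∧
                       pvCell grid (x + d.1) (y + d.2.1) ≠ "*"))).map
                      (fun d : Int × Int × Int => ((x + d.1, y + d.2.1), path ++ [[x, y, d.2.2]]))
                      ++ rest)
              rcases hvisit : pvVisit grid rows cols f0 (x + d.1) (y + d.2.1) visC with ⟨r, w⟩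
              have hwmono : ∀ q, PySem.Set.contains (PySem.Set.add vis (x, y)) q = true →
                  PySem.Set.contains w q = true := by
                intro q hq
                have := pvVisit_mono grid rows cols f0 (x + d.1) (y + d.2.1) visC q (hmono q hq)
                rw [hvisit] at this
                exact this
              have hwle : pvU rows cols w ≤ pvU rows cols visC := by
                apply pvU_mono
                intro q hq
                have := pvVisit_mono grid rows cols f0 (x + d.1) (y + d.2.1) visC q hq
                rw [hvisit] at this
                exact this
              have hlenf : (List.filter (fun d => decide
                      (0 ≤ x + d.1 ∧ x + d.1 < rows ∧ 0 ≤ y + d.2.1 ∧ y + d.2.1 < cols ∧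
                       ¬ PySem.Set.contains (PySem.Set.add vis (x, y)) (x + d.1, y + d.2.1) ∧
                       pvCell grid (x + d.1) (y + d.2.1) ≠ "*")) ds).length ≤ ds.length := List.length_filter_le _ _
              match r, hvisit with
              | some (rt0, pos0), hvisit =>
                have htry : pvTry (pvVisit grid rows cols f0) x y (d :: ds) visC
                    = (some (rt0 ++ [[x, y, d.2.2]], pos0), w) := by
                  simp only [pvTry, hvisit]
                constructor
                · intro vis' hv
                  rw [htry] at hv
                  exact absurd (congrArg Prod.fst hv) (by simp)
                · intro rt pos vis' hv fa2 hfa2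
                  rw [htry] at hv
                  have h1 := congrArg Prod.fst hv
                  simp only [Option.some.injEq, Prod.mk.injEq] at h1
                  rw [hfilter] at hfa2 ⊢
                  simp only [List.map_cons, List.cons_append, List.length_cons, List.length_append, List.length_map] at hfa2 ⊢
                  have := (hIH fa2 f0 le_rfl
                    (by simp only [List.length_append, List.length_map]; omega)
                    hfC).2 rt0 pos0 w hvisit
                  rw [this, ← h1.1, ← h1.2]
                  simp [List.reverse_append]
              | none, hvisit =>
                have htry : pvTry (pvVisit grid rows cols f0) x y (d :: ds) visC
                    = pvTry (pvVisit grid rows cols f0) x y ds w := by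
                  simp only [pvTry, hvisit]
                have hIHds := ihds w hwmono (by omega)
                constructor
                · intro vis' hv fa2 hfa2 fa' hfa'
                  rw [htry] at hv
                  rw [hfilter] at hfa2 ⊢
                  simp only [List.map_cons, List.cons_append, List.length_cons, List.length_append, List.length_map] at hfa2 ⊢
                  have hstep := (hIH fa2
                    f0 le_rfl (by simp only [List.length_append, List.length_map]; omega)
                    hfC).1 w hvisit
                    (5 * pvU rows cols w + (List.map (fun d : Int × Int × Int => ((x + d.1, y + d.2.1), path ++ [[x, y, d.2.2]])) (List.filter (fun d => decide
                      (0 ≤ x + d.1 ∧ x + d.1 < rows ∧ 0 ≤ y + d.2.1 ∧ y + d.2.1 < cols ∧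
                       ¬ PySem.Set.contains (PySem.Set.add vis (x, y)) (x + d.1, y + d.2.1) ∧
                       pvCell grid (x + d.1) (y + d.2.1) ≠ "*")) ds) ++ rest).length + 1)
                    (by simp only [List.length_append, List.length_map]; omega)
                  rw [hstep]
                  exact hIHds.1 vis' hv _ (by simp only [List.length_append, List.length_map]; omega) fa' hfa'
                · intro rt pos vis' hv fa2 hfa2
                  rw [htry] at hv
                  rw [hfilter] at hfa2 ⊢
                  simp only [List.length_cons, List.length_append, List.length_map] at hfa2
                  simp only [List.map_cons, List.cons_append] at ⊢
                  have hstep := (hIH fa2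
                    f0 le_rfl (by simp only [List.length_append, List.length_map]; omega)
                    hfC).1 w hvisit
                    (5 * pvU rows cols w + (List.map (fun d : Int × Int × Int => ((x + d.1, y + d.2.1), path ++ [[x, y, d.2.2]])) (List.filter (fun d => decide
                      (0 ≤ x + d.1 ∧ x + d.1 < rows ∧ 0 ≤ y + d.2.1 ∧ y + d.2.1 < cols ∧
                       ¬ PySem.Set.contains (PySem.Set.add vis (x, y)) (x + d.1, y + d.2.1) ∧
                       pvCell grid (x + d.1) (y + d.2.1) ≠ "*")) ds) ++ rest).length + 1)
                    (by simp only [List.length_append, List.length_map]; omega)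
                  rw [hstep]
                  refine hIHds.2 rt pos vis' hv _ ?_
                  simp only [List.length_append, List.length_map]
                  omega
            · -- A never pushed this child; B's visit of it returns immediately and is skipped
              have hfilter : List.filter (fun d => decide
                      (0 ≤ x + d.1 ∧ x + d.1 < rows ∧ 0 ≤ y + d.2.1 ∧ y + d.2.1 < cols ∧
                       ¬ PySem.Set.contains (PySem.Set.add vis (x, y)) (x + d.1, y + d.2.1) ∧
                       pvCell grid (x + d.1) (y + d.2.1) ≠ "*")) (d :: ds)
                  = List.filter (fun d => decide
                      (0 ≤ x + d.1 ∧ x + d.1 < rows ∧ 0 ≤ y + d.2.1 ∧ y + d.2.1 < cols ∧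
                       ¬ PySem.Set.contains (PySem.Set.add vis (x, y)) (x + d.1, y + d.2.1) ∧
                       pvCell grid (x + d.1) (y + d.2.1) ≠ "*")) ds :=
                List.filter_cons_of_neg (fun hdec => hgd (of_decide_eq_true hdec))
              have hnone : pvVisit grid rows cols f0 (x + d.1) (y + d.2.1) visC = (none, visC) := by
                obtain ⟨f1, rfl⟩ : ∃ k, f0 = k + 1 := ⟨f0 - 1, by omega⟩
                simp only [pvVisit]
                rw [if_pos]
                by_cases hb1 : 0 ≤ x + d.1 ∧ x + d.1 < rows ∧ 0 ≤ y + d.2.1 ∧ y + d.2.1 < cols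
                · by_cases hcc : PySem.Set.contains (PySem.Set.add vis (x, y)) (x + d.1, y + d.2.1) = true
                  · exact Or.inr (Or.inl (hmono _ hcc))
                  · by_cases hww : pvCell grid (x + d.1) (y + d.2.1) = "*"
                    · exact Or.inr (Or.inr hww)
                    · exact absurd ⟨hb1.1, hb1.2.1, hb1.2.2.1, hb1.2.2.2, hcc, hww⟩ hgd
                · exact Or.inl hb1
              have htry : pvTry (pvVisit grid rows cols (f0)) x y (d :: ds) visC
                  = pvTry (pvVisit grid rows cols (f0)) x y ds visC := by
                simp only [pvTry, hnone]
              have hIHds := ihds visC hmono huC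
              rw [htry, hfilter]
              exact hIHds
        have hMA2 := MA2 pvBDirs (PySem.Set.add vis (x, y)) (fun q hq => hq) (by omega)
        constructor
        · intro vis' hv fa' hfa'
          rw [hAhead]
          refine hMA2.1 vis' hv fa0 ?_ fa' hfa'
          have h4 : (List.filter (fun d => decide
                      (0 ≤ x + d.1 ∧ x + d.1 < rows ∧ 0 ≤ y + d.2.1 ∧ y + d.2.1 < cols ∧
                       ¬ PySem.Set.contains (PySem.Set.add vis (x, y)) (x + d.1, y + d.2.1) ∧
                       pvCell grid (x + d.1) (y + d.2.1) ≠ "*")) pvBDirs).length ≤ 4 := by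
            have := List.length_filter_le (fun d => decide
                      (0 ≤ x + d.1 ∧ x + d.1 < rows ∧ 0 ≤ y + d.2.1 ∧ y + d.2.1 < cols ∧
                       ¬ PySem.Set.contains (PySem.Set.add vis (x, y)) (x + d.1, y + d.2.1) ∧
                       pvCell grid (x + d.1) (y + d.2.1) ≠ "*")) pvBDirs
            simpa [pvBDirs] using this
          simp only [List.length_append, List.length_map]
          omega
        · intro rt pos vis' hv
          rw [hAhead]
          refine hMA2.2 rt pos vis' hv fa0 ?_
          have h4 : (List.filter (fun d => decide
                      (0 ≤ x + d.1 ∧ x + d.1 < rows ∧ 0 ≤ y + d.2.1 ∧ y + d.2.1 < cols ∧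
                       ¬ PySem.Set.contains (PySem.Set.add vis (x, y)) (x + d.1, y + d.2.1) ∧
                       pvCell grid (x + d.1) (y + d.2.1) ≠ "*")) pvBDirs).length ≤ 4 := by
            have := List.length_filter_le (fun d => decide
                      (0 ≤ x + d.1 ∧ x + d.1 < rows ∧ 0 ≤ y + d.2.1 ∧ y + d.2.1 < cols ∧
                       ¬ PySem.Set.contains (PySem.Set.add vis (x, y)) (x + d.1, y + d.2.1) ∧
                       pvCell grid (x + d.1) (y + d.2.1) ≠ "*")) pvBDirs
            simpa [pvBDirs] using this
          simp only [List.length_append, List.length_map]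
          omega

-- B's backtracking machine computes what the reference recursion computes
theorem pvB_visit (grid : List (List String)) (rows cols : Int) :
    ∀ (n : Nat) (vis : PySem.Set (Int × Int)) (x y : Int) (i : Nat)
      (rest : List (Int × Int × Nat)) (fm f : Nat),
      pvU rows cols vis ≤ n →
      i ≤ 4 →
      (∀ fr ∈ rest, fr.2.2 ≤ 4) →
      5 * pvU rows cols vis + (5 - i) + pvNu rest < fm →
      pvU rows cols vis < f →
      ¬ (i = 0 ∧ (pvCell grid x y = "f" ∨ pvCell grid x y = "F")) →
      ((∀ vis', pvTry (pvVisit grid rows cols f) x y (pvBDirs.drop i) vis = (none, vis') →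
          ∀ fm', 5 * pvU rows cols vis' + pvNu rest < fm' →
            pvLoopB grid rows cols fm ((x, y, i) :: rest) vis
              = pvLoopB grid rows cols fm' rest vis')
       ∧ (∀ rt pos vis', pvTry (pvVisit grid rows cols f) x y (pvBDirs.drop i) vis = (some (rt, pos), vis') →
           pvLoopB grid rows cols fm ((x, y, i) :: rest) vis
             = ((rest.map pvStepF).reverse ++ rt.reverse,
                (((rest.map pvStepF).reverse ++ rt.reverse).length : Int) - 1, pos))) := by
  intro n
  induction n using Nat.strong_induction_on with
  | _ n ih =>
    intro vis x y i rest fm f hun hi hrest hfm hf hnf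
    -- inner induction on the number of directions the frame still has to try
    have MB2 : ∀ (k i : Nat), i + k = 4 →
        ∀ (visC : PySem.Set (Int × Int)) (fm2 : Nat),
        pvU rows cols visC ≤ n →
        pvU rows cols visC < f →
        5 * pvU rows cols visC + (5 - i) + pvNu rest < fm2 →
        ¬ (i = 0 ∧ (pvCell grid x y = "f" ∨ pvCell grid x y = "F")) →
        ((∀ vis', pvTry (pvVisit grid rows cols f) x y (pvBDirs.drop i) visC = (none, vis') →
            ∀ fm', 5 * pvU rows cols vis' + pvNu rest < fm' →
              pvLoopB grid rows cols fm2 ((x, y, i) :: rest) visC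
                = pvLoopB grid rows cols fm' rest vis')
         ∧ (∀ rt pos vis', pvTry (pvVisit grid rows cols f) x y (pvBDirs.drop i) visC
              = (some (rt, pos), vis') →
             pvLoopB grid rows cols fm2 ((x, y, i) :: rest) visC
               = ((rest.map pvStepF).reverse ++ rt.reverse,
                  (((rest.map pvStepF).reverse ++ rt.reverse).length : Int) - 1, pos))) := by
      intro k
      induction k with
      | zero =>
        intro i hik visC fm2 hunC hfC hfm2 hnfC
        have hi4 : i = 4 := by omega
        subst hi4
        have hdrop : pvBDirs.drop 4 = [] := rfl
        rw [hdrop]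
        obtain ⟨fm2', rfl⟩ : ∃ m, fm2 = m + 1 := ⟨fm2 - 1, by omega⟩
        constructor
        · intro vis' hv fm' hfm'
          obtain ⟨rfl⟩ : visC = vis' := by
            have := congrArg Prod.snd hv; simpa [pvTry] using this
          simp only [pvLoopB, if_true]
          exact pvLoopB_stable grid rows cols (5 * pvU rows cols visC + pvNu rest)
            rest visC fm2' fm' hrest le_rfl (by omega) (by omega)
        · intro rt pos vis' hv
          exact absurd (congrArg Prod.fst hv) (by simp [pvTry])
      | succ k ihk =>
        intro i hik visC fm2 hunC hfC hfm2 hnfC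
        have hilt : i < pvBDirs.length := by simp [pvBDirs]; omega
        have hdrop : pvBDirs.drop i = pvBDirs[i] :: pvBDirs.drop (i + 1) :=
          List.drop_eq_getElem_cons hilt
        have hgetD : pvBDirs.getD i (0, 0, 0) = pvBDirs[i] := List.getD_eq_getElem pvBDirs (0, 0, 0) hilt
        obtain ⟨fm2', rfl⟩ : ∃ m, fm2 = m + 1 := ⟨fm2 - 1, by omega⟩
        obtain ⟨f0, rfl⟩ : ∃ m, f = m + 1 := ⟨f - 1, by omega⟩
        have hmachine : pvLoopB grid rows cols (fm2' + 1) ((x, y, i) :: rest) visC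
            = if 0 ≤ x + pvBDirs[i].1 ∧ x + pvBDirs[i].1 < rows ∧
                 0 ≤ y + pvBDirs[i].2.1 ∧ y + pvBDirs[i].2.1 < cols ∧
                 ¬ PySem.Set.contains visC (x + pvBDirs[i].1, y + pvBDirs[i].2.1) ∧
                 pvCell grid (x + pvBDirs[i].1) (y + pvBDirs[i].2.1) ≠ "*" then
                pvLoopB grid rows cols fm2' ((x + pvBDirs[i].1, y + pvBDirs[i].2.1, 0) :: (x, y, i + 1) :: rest)
                  (PySem.Set.add visC (x + pvBDirs[i].1, y + pvBDirs[i].2.1))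
              else pvLoopB grid rows cols fm2' ((x, y, i + 1) :: rest) visC := by
          simp only [pvLoopB]
          rw [if_neg hnfC, if_neg (by omega), hgetD]
        rw [hdrop]
        by_cases hok : 0 ≤ x + pvBDirs[i].1 ∧ x + pvBDirs[i].1 < rows ∧
            0 ≤ y + pvBDirs[i].2.1 ∧ y + pvBDirs[i].2.1 < cols ∧
            ¬ PySem.Set.contains visC (x + pvBDirs[i].1, y + pvBDirs[i].2.1) ∧
            pvCell grid (x + pvBDirs[i].1) (y + pvBDirs[i].2.1) ≠ "*"
        · rw [if_pos hok] at hmachine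
          have hcf : PySem.Set.contains visC (x + pvBDirs[i].1, y + pvBDirs[i].2.1) = false := by
            cases hcv : PySem.Set.contains visC (x + pvBDirs[i].1, y + pvBDirs[i].2.1) with
            | false => rfl
            | true => exact absurd hcv hok.2.2.2.2.1
          have hu1 : pvU rows cols (PySem.Set.add visC (x + pvBDirs[i].1, y + pvBDirs[i].2.1)) + 1
              = pvU rows cols visC :=
            pvU_add rows cols _ _ visC ⟨hok.1, hok.2.1⟩ ⟨hok.2.2.1, hok.2.2.2.1⟩ hcf
          have hvg : pvVisit grid rows cols (f0 + 1) (x + pvBDirs[i].1) (y + pvBDirs[i].2.1) visC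
              = if pvCell grid (x + pvBDirs[i].1) (y + pvBDirs[i].2.1) = "f" ∨
                   pvCell grid (x + pvBDirs[i].1) (y + pvBDirs[i].2.1) = "F" then
                  (some ([[x + pvBDirs[i].1, y + pvBDirs[i].2.1]],
                         (x + pvBDirs[i].1, y + pvBDirs[i].2.1)),
                   PySem.Set.add visC (x + pvBDirs[i].1, y + pvBDirs[i].2.1))
                else pvTry (pvVisit grid rows cols f0) (x + pvBDirs[i].1) (y + pvBDirs[i].2.1)
                  pvBDirs (PySem.Set.add visC (x + pvBDirs[i].1, y + pvBDirs[i].2.1)) := by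
            simp only [pvVisit]
            rw [if_neg (by push Not; exact ⟨⟨hok.1, hok.2.1, hok.2.2.1, hok.2.2.2.1⟩, hok.2.2.2.2.1, hok.2.2.2.2.2⟩)]
          by_cases hcfood : pvCell grid (x + pvBDirs[i].1) (y + pvBDirs[i].2.1) = "f" ∨
              pvCell grid (x + pvBDirs[i].1) (y + pvBDirs[i].2.1) = "F"
          · rw [if_pos hcfood] at hvg
            have htry : pvTry (pvVisit grid rows cols (f0 + 1)) x y
                (pvBDirs[i] :: pvBDirs.drop (i + 1)) visC
                = (some ([[x + pvBDirs[i].1, y + pvBDirs[i].2.1]] ++ [[x, y, pvBDirs[i].2.2]],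
                         (x + pvBDirs[i].1, y + pvBDirs[i].2.1)),
                   PySem.Set.add visC (x + pvBDirs[i].1, y + pvBDirs[i].2.1)) := by
              simp only [pvTry, hvg]
            constructor
            · intro vis' hv
              rw [htry] at hv
              exact absurd (congrArg Prod.fst hv) (by simp)
            · intro rt pos vis' hv
              rw [htry] at hv
              have h1 := congrArg Prod.fst hv
              simp only [Option.some.injEq, Prod.mk.injEq] at h1
              obtain ⟨fm2'', rfl⟩ : ∃ m, fm2' = m + 1 := ⟨fm2' - 1, by omega⟩
              rw [hmachine]
              simp only [pvLoopB]
              rw [if_pos ⟨by trivial, hcfood⟩, ← h1.1, ← h1.2]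
              simp [pvStepF, List.append_assoc, List.getElem?_eq_getElem hilt]
          · rw [if_neg hcfood] at hvg
            have hIH := ih (pvU rows cols (PySem.Set.add visC (x + pvBDirs[i].1, y + pvBDirs[i].2.1)))
              (by omega) (PySem.Set.add visC (x + pvBDirs[i].1, y + pvBDirs[i].2.1))
              (x + pvBDirs[i].1) (y + pvBDirs[i].2.1) 0 ((x, y, i + 1) :: rest) fm2' f0
              le_rfl (by omega)
              (by intro fr hfr
                  simp only [List.mem_cons] at hfr
                  rcases hfr with rfl | hfr
                  · simp; omega
                  · exact hrest fr hfr)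
              (by simp only [pvNu, List.map_cons, List.sum_cons]
                  have hnur : (rest.map (fun f => 5 - f.2.2)).sum = pvNu rest := rfl
                  rw [hnur]; omega)
              (by omega)
              (by intro hcon; exact hcfood hcon.2)
            have hdrop0 : pvBDirs.drop 0 = pvBDirs := rfl
            rw [hdrop0] at hIH
            rcases htv : pvTry (pvVisit grid rows cols f0) (x + pvBDirs[i].1) (y + pvBDirs[i].2.1)
                pvBDirs (PySem.Set.add visC (x + pvBDirs[i].1, y + pvBDirs[i].2.1)) with ⟨r, w⟩
            have hwmono : ∀ q, PySem.Set.contains visC q = true → PySem.Set.contains w q = true := by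
              intro q hq
              have h1 : PySem.Set.contains (PySem.Set.add visC (x + pvBDirs[i].1, y + pvBDirs[i].2.1)) q = true := by
                rw [PySem.Set.contains_iff] at hq ⊢
                exact (PySem.Set.mem_add _ _ _).mpr (Or.inl hq)
              have := pvTry_mono (pvVisit grid rows cols f0) (pvVisit_mono grid rows cols f0)
                pvBDirs (x + pvBDirs[i].1) (y + pvBDirs[i].2.1) _ q h1
              rw [htv] at this
              exact this
            have hwle : pvU rows cols w ≤ pvU rows cols (PySem.Set.add visC (x + pvBDirs[i].1, y + pvBDirs[i].2.1)) := by
              apply pvU_mono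
              intro q hq
              have := pvTry_mono (pvVisit grid rows cols f0) (pvVisit_mono grid rows cols f0)
                pvBDirs (x + pvBDirs[i].1) (y + pvBDirs[i].2.1) _ q hq
              rw [htv] at this
              exact this
            match r, htv with
            | some (rt0, pos0), htv =>
              have htry : pvTry (pvVisit grid rows cols (f0 + 1)) x y
                  (pvBDirs[i] :: pvBDirs.drop (i + 1)) visC
                  = (some (rt0 ++ [[x, y, pvBDirs[i].2.2]], pos0), w) := by
                simp only [pvTry, hvg, htv]
              constructor
              · intro vis' hv
                rw [htry] at hv
                exact absurd (congrArg Prod.fst hv) (by simp)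
              · intro rt pos vis' hv
                rw [htry] at hv
                have h1 := congrArg Prod.fst hv
                simp only [Option.some.injEq, Prod.mk.injEq] at h1
                rw [hmachine]
                have := hIH.2 rt0 pos0 w htv
                rw [this, ← h1.1, ← h1.2]
                simp [pvStepF, List.reverse_append, List.append_assoc, List.getElem?_eq_getElem hilt]
            | none, htv =>
              have htry : pvTry (pvVisit grid rows cols (f0 + 1)) x y
                  (pvBDirs[i] :: pvBDirs.drop (i + 1)) visC
                  = pvTry (pvVisit grid rows cols (f0 + 1)) x y (pvBDirs.drop (i + 1)) w := by
                simp only [pvTry, hvg, htv]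
              have hmach2 := hIH.1 w htv
                (5 * pvU rows cols w + (5 - (i + 1)) + pvNu rest + 1)
                (by simp only [pvNu, List.map_cons, List.sum_cons]
                    have hnur : (rest.map (fun f => 5 - f.2.2)).sum = pvNu rest := rfl
                    rw [hnur]; omega)
              have hIHk := ihk (i + 1) (by omega) w
                (5 * pvU rows cols w + (5 - (i + 1)) + pvNu rest + 1)
                (by omega) (by omega) (by omega) (by omega)
              rw [htry, hmachine, hmach2]
              exact hIHk
        · rw [if_neg hok] at hmachine
          have hnone : pvVisit grid rows cols (f0 + 1) (x + pvBDirs[i].1) (y + pvBDirs[i].2.1) visC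
              = (none, visC) := by
            simp only [pvVisit]
            rw [if_pos]
            by_cases hb1 : 0 ≤ x + pvBDirs[i].1 ∧ x + pvBDirs[i].1 < rows ∧
                0 ≤ y + pvBDirs[i].2.1 ∧ y + pvBDirs[i].2.1 < cols
            · by_cases hcc : PySem.Set.contains visC (x + pvBDirs[i].1, y + pvBDirs[i].2.1) = true
              · exact Or.inr (Or.inl hcc)
              · by_cases hww : pvCell grid (x + pvBDirs[i].1) (y + pvBDirs[i].2.1) = "*"
                · exact Or.inr (Or.inr hww)
                · exact absurd ⟨hb1.1, hb1.2.1, hb1.2.2.1, hb1.2.2.2, hcc, hww⟩ hok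
            · exact Or.inl hb1
          have htry : pvTry (pvVisit grid rows cols (f0 + 1)) x y
              (pvBDirs[i] :: pvBDirs.drop (i + 1)) visC
              = pvTry (pvVisit grid rows cols (f0 + 1)) x y (pvBDirs.drop (i + 1)) visC := by
            simp only [pvTry, hnone]
          have hIHk := ihk (i + 1) (by omega) visC fm2' hunC hfC
            (by simp only [pvNu] at hfm2 ⊢; omega) (by omega)
          rw [htry, hmachine]
          exact hIHk
    exact MB2 (4 - i) i (by omega) vis fm hun hf hfm hnf

-- ===== VERDICT (by name: the statement is the Claim_ definition above) =====
theorem dfs_text_spec : Claim_equal_dfs_text := by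
  intro grid start _ _
  unfold Spec_dfs_text dfs_text dfs_text_alt
  obtain ⟨sx, sy⟩ := start
  simp only
  have hUE : pvU (grid.length : Int) ((grid.headD []).length : Int) PySem.Set.empty
      = grid.length * (grid.headD []).length := by
    rw [pvU_empty]; simp
  have hassoc : 5 * grid.length * (grid.headD []).length
      = 5 * (grid.length * (grid.headD []).length) := by ring
  have hA := pvA_visit grid (grid.length : Int) ((grid.headD []).length : Int)
    (grid.length * (grid.headD []).length) PySem.Set.empty sx sy [] []
    (5 * grid.length * (grid.headD []).length + 2) (grid.length * (grid.headD []).length + 1)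
    (by omega) (by simp only [List.length_nil]; omega) (by omega)
  by_cases hg : ¬ (0 ≤ sx ∧ sx < (grid.length : Int) ∧ 0 ≤ sy ∧ sy < ((grid.headD []).length : Int)) ∨
      PySem.Set.contains PySem.Set.empty (sx, sy) = true ∨ pvCell grid sx sy = "*"
  · -- both return the empty result immediately
    have hvnone : pvVisit grid (grid.length : Int) ((grid.headD []).length : Int)
        (grid.length * (grid.headD []).length + 1) sx sy PySem.Set.empty
        = (none, PySem.Set.empty) := by
      simp only [pvVisit]
      rw [if_pos hg]
    have hAres := hA.1 PySem.Set.empty hvnone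
      (5 * grid.length * (grid.headD []).length + 1) (by simp only [List.length_nil]; omega)
    rw [hAres]
    have hgr : ¬ (0 ≤ sx ∧ sx < (grid.length : Int) ∧ 0 ≤ sy ∧ sy < ((grid.headD []).length : Int)) ∨
        pvCell grid sx sy = "*" := by
      rcases hg with h | h | h
      · exact Or.inl h
      · exact absurd h (by simp [PySem.Set.empty, PySem.Set.contains])
      · exact Or.inr h
    rw [if_pos hgr]
    rfl
  · push Not at hg
    obtain ⟨hb, hcE, hw⟩ := hg
    have hRC1 : 1 ≤ grid.length * (grid.headD []).length := by
      obtain ⟨h1, h2, h3, h4⟩ := hb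
      have : 0 < grid.length := by omega
      have : 0 < (grid.headD []).length := by omega
      exact Nat.one_le_iff_ne_zero.mpr (by positivity)
    rw [if_neg (by push Not; exact ⟨hb, hw⟩)]
    have hcf : PySem.Set.contains PySem.Set.empty (sx, sy) = false := by
      simp [PySem.Set.empty, PySem.Set.contains]
    have hu0 : pvU (grid.length : Int) ((grid.headD []).length : Int)
        (PySem.Set.add PySem.Set.empty (sx, sy)) + 1
        = pvU (grid.length : Int) ((grid.headD []).length : Int) PySem.Set.empty :=
      pvU_add _ _ sx sy PySem.Set.empty ⟨hb.1, hb.2.1⟩ ⟨hb.2.2.1, hb.2.2.2⟩ hcf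
    have hvg : pvVisit grid (grid.length : Int) ((grid.headD []).length : Int)
        (grid.length * (grid.headD []).length + 1) sx sy PySem.Set.empty
        = if pvCell grid sx sy = "f" ∨ pvCell grid sx sy = "F" then
            (some ([[sx, sy]], (sx, sy)), PySem.Set.add PySem.Set.empty (sx, sy))
          else pvTry (pvVisit grid (grid.length : Int) ((grid.headD []).length : Int)
              (grid.length * (grid.headD []).length)) sx sy pvBDirs
            (PySem.Set.add PySem.Set.empty (sx, sy)) := by
      simp only [pvVisit]
      rw [if_neg (by push Not; exact ⟨hb, by simp, hw⟩)]
    by_cases hfood : pvCell grid sx sy = "f" ∨ pvCell grid sx sy = "F"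
    · rw [if_pos hfood] at hvg
      have hAres := hA.2 [[sx, sy]] (sx, sy) (PySem.Set.add PySem.Set.empty (sx, sy)) hvg
      rw [hAres]
      simp only [pvLoopB]
      rw [if_pos ⟨by trivial, hfood⟩]
      simp
    · rw [if_neg hfood] at hvg
      have hB := pvB_visit grid (grid.length : Int) ((grid.headD []).length : Int)
        (pvU (grid.length : Int) ((grid.headD []).length : Int)
          (PySem.Set.add PySem.Set.empty (sx, sy)))
        (PySem.Set.add PySem.Set.empty (sx, sy)) sx sy 0 []
        (5 * grid.length * (grid.headD []).length + 2) (grid.length * (grid.headD []).length)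
        le_rfl (by omega) (by intro fr hfr; simp at hfr)
        (by simp only [pvNu, List.map_nil, List.sum_nil]; omega)
        (by omega)
        (by intro h; exact hfood h.2)
      have hdrop0 : pvBDirs.drop 0 = pvBDirs := rfl
      rw [hdrop0] at hB
      rcases hT : pvTry (pvVisit grid (grid.length : Int) ((grid.headD []).length : Int)
          (grid.length * (grid.headD []).length)) sx sy pvBDirs
          (PySem.Set.add PySem.Set.empty (sx, sy)) with ⟨r, w⟩
      match r, hT with
      | some (rt, pos), hT =>
        have hAres := hA.2 rt pos w (by rw [hvg]; exact hT)
        have hBres := hB.2 rt pos w hT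
        rw [hAres, hBres]
        simp
      | none, hT =>
        have hAres := hA.1 w (by rw [hvg]; exact hT)
          (5 * pvU (grid.length : Int) ((grid.headD []).length : Int) w + 1)
          (by simp only [List.length_nil]; omega)
        have hBres := hB.1 w hT
          (5 * pvU (grid.length : Int) ((grid.headD []).length : Int) w + 1)
          (by simp only [pvNu, List.map_nil, List.sum_nil]; omega)
        rw [hAres, hBres]
        rfl
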